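-- pv_equiv track=rewrite | github.com/yukikitayama/leetcode-python | daily-challenge/daily_2460_apply_operations_to_an_array.py | applyOperations1
-- ===== SOURCE A (Python) =====
-- from typing import List
--
-- def applyOperations1(nums: List[int]) -> List[int]:
--     ans = []
--     counter = 0
--
--     for i in range(len(nums) - 1):
--
--         if nums[i] == nums[i + 1]:
--             nums[i] *= 2
--             nums[i + 1] = 0
--
--         # If current is 0, increment counter
--         if nums[i] == 0:
--             counter += 1
--         # If current is not 0, append it to ans
--         elif nums[i] != 0:
--             ans.append(nums[i])
--
--     # If last element is 0, increment couter
--     if nums[-1] == 0: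
--         counter += 1
--
--     # If last element is not 0, append it to ans
--     elif nums[-1] != 0:
--         ans.append(nums[-1])
--
--     return ans + [0] * counter
-- ===== SOURCE B (Python) =====
-- from typing import List
--
-- def applyOperations1(nums: List[int]) -> List[int]:
--     # Run-length form: a maximal run of k equal values v contributes
--     # k//2 copies of 2v followed by k%2 copies of v (zeros contribute nothing);
--     # pad with zeros to the original length.  Return value only: A mutates
--     # nums in place, B does not.
--     n = len(nums)
--     out = []
--     i = 0
--     while i < n:
--         j = i + 1
--         while j < n and nums[j] == nums[i]:
--             j += 1
--         v = nums[i]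
--         k = j - i
--         if v != 0:
--             out += [2 * v] * (k // 2) + [v] * (k % 2)
--         i = j
--     return out + [0] * (n - len(out))
-- ===== Notes on version B (the rewrite author's own statement) =====
-- stated objective: alternative
-- what changed: A simulates the pairwise merges sequentially with in-place mutation, zero counting and a last-element special case; B never simulates them: it splits nums into maximal runs of equal values and emits each run's result in closed form (k//2 copies of 2v then k%2 copies of v, zeros dropped), padding with zeros to the original length.
import Mathlib
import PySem

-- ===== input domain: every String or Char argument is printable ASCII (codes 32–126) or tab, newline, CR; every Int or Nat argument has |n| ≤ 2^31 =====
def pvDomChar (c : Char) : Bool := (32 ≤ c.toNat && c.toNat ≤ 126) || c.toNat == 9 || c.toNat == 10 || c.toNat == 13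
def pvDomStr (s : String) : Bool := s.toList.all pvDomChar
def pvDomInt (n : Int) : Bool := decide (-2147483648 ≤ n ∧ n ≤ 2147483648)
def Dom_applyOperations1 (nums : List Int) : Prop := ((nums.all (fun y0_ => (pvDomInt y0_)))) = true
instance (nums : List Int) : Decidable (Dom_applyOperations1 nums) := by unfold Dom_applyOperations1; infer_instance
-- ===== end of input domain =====

-- B drops A's sequential in-place merge simulation entirely: it splits nums into maximal runs
-- of equal values and emits each run's contribution in closed form (k//2 copies of 2v, then
-- k%2 copies of v; zero runs contribute nothing), padding with zeros to the original length.
-- Return-value equivalence only: A mutates its argument in place, B does not.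

-- ===== PORT A =====
-- one iteration of A's `for i in range(len(nums) - 1)` loop; state = (nums, ans, counter)
def aStep (s : List Int × List Int × Int) (i : Int) : List Int × List Int × Int :=
  let l := s.1
  let l := if PySem.List.pyGetD l i 0 = PySem.List.pyGetD l (i + 1) 0 then
             PySem.List.pySetD (PySem.List.pySetD l i (2 * PySem.List.pyGetD l i 0)) (i + 1) 0
           else l
  if PySem.List.pyGetD l i 0 = 0 then (l, s.2.1, s.2.2 + 1)
  else (l, s.2.1 ++ [PySem.List.pyGetD l i 0], s.2.2)

def applyOperations1 (nums : List Int) : List Int :=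
  let s := (PySem.List.pyRange 0 ((nums.length : Int) - 1) 1).foldl aStep (nums, [], 0)
  let last := PySem.List.pyGetD s.1 (-1) 0
  let c := if last = 0 then s.2.2 + 1 else s.2.2
  let ans := if last = 0 then s.2.1 else s.2.1 ++ [last]
  ans ++ List.replicate c.toNat 0

-- ===== PORT B =====
-- B's outer while loop: peel off the maximal leading run, emit its closed-form contribution
def bRuns : List Int → List Int
  | [] => []
  | v :: t =>
    let run := t.takeWhile (fun x => x = v)      -- B's inner `while` scanning the run
    let rest := t.dropWhile (fun x => x = v)
    let k := run.length + 1
    (if v ≠ 0 then List.replicate (k / 2) (2 * v) ++ List.replicate (k % 2) v else [])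
      ++ bRuns rest
termination_by l => l.length
decreasing_by
  have := List.length_dropWhile_le (fun x => decide (x = v)) t
  simpa using Nat.lt_succ_of_le this

def applyOperations1_alt (nums : List Int) : List Int :=
  let out := bRuns nums
  out ++ List.replicate (nums.length - out.length) 0

-- ===== PRECONDITION & SPEC =====
-- Pre_ excludes only the empty list, on which A raises IndexError (nums[-1]).
def Pre_applyOperations1 (nums : List Int) : Prop := nums ≠ []
instance (nums : List Int) : Decidable (Pre_applyOperations1 nums) := by
  unfold Pre_applyOperations1; infer_instance
def pvWitness_applyOperations1 : List Int := ([1, 1, 2, 0, 2])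

def Spec_applyOperations1 (nums : List Int) (out : List Int) : Prop := out = applyOperations1_alt nums
instance (nums : List Int) (out : List Int) : Decidable (Spec_applyOperations1 nums out) := by unfold Spec_applyOperations1; infer_instance

-- ===== CLAIM (what is proved, stated in full; the proofs are below) =====
def Claim_equal_applyOperations1 : Prop := ∀ (nums : List Int), Dom_applyOperations1 nums → Pre_applyOperations1 nums → Spec_applyOperations1 nums (applyOperations1 nums)

-- ===== LEMMAS AND PROOFS =====

-- proof-side model of A's loop: the sequential merge scan carrying the current value
def bLoop (cur : Int) : List Int → List Int
  | [] => [cur]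
  | x :: rest => if cur = x then 2 * cur :: bLoop 0 rest else cur :: bLoop x rest

-- the nonzeros of the merge scan, starting fresh on a list
def pvF : List Int → List Int
  | [] => []
  | h :: t => (bLoop h t).filter (fun v => v ≠ 0)

theorem bLoop_length (cur : Int) (rest : List Int) : (bLoop cur rest).length = rest.length + 1 := by
  induction rest generalizing cur with
  | nil => simp [bLoop]
  | cons x r ih =>
    by_cases h : cur = x <;> simp [bLoop, h, ih]

theorem bLoop_ne_nil (cur : Int) (rest : List Int) : bLoop cur rest ≠ [] := by
  have := bLoop_length cur rest
  intro h; simp [h] at this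

-- restarting from a zeroed slot: the scan's nonzeros are those of a fresh scan
theorem filter_bLoop_zero (l : List Int) :
    (bLoop 0 l).filter (fun v => v ≠ 0) = pvF l := by
  cases l with
  | nil => simp [bLoop, pvF]
  | cons x r =>
    by_cases hx : (0 : Int) = x
    · subst hx; simp [bLoop, pvF]
    · simp [bLoop, hx, pvF]

-- closed form for a zero run
theorem filter_bLoop_zero_run (m : Nat) (rest : List Int) :
    (bLoop 0 (List.replicate m 0 ++ rest)).filter (fun v => v ≠ 0) = pvF rest := by
  induction m with
  | zero => simpa using filter_bLoop_zero rest
  | succ m ih => simpa [bLoop] using ih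

-- closed form for a nonzero run of length m+1 followed by rest not starting with v
theorem filter_bLoop_run (v : Int) (hv : v ≠ 0) : ∀ (m : Nat) (rest : List Int),
    (rest = [] ∨ ∃ x r, rest = x :: r ∧ x ≠ v) →
    (bLoop v (List.replicate m v ++ rest)).filter (fun u => u ≠ 0)
      = List.replicate ((m + 1) / 2) (2 * v) ++ List.replicate ((m + 1) % 2) v ++ pvF rest := by
  intro m
  induction m using Nat.strong_induction_on with
  | _ m ih =>
    intro rest hrest
    match m with
    | 0 =>
      rcases hrest with h | ⟨x, r, rfl, hx⟩
      · subst h; simp [bLoop, pvF, hv]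
      · have hvx : v ≠ x := fun h => hx h.symm
        simp [bLoop, hvx, pvF, hv]
    | 1 =>
      have h0 := filter_bLoop_zero rest
      simp [bLoop, hv]
      simpa using h0
    | (m + 2) =>
      have hih := ih m (by omega) rest hrest
      have h2v : 2 * v ≠ 0 := by intro h; apply hv; omega
      have h0v : (0 : Int) ≠ v := fun h => hv h.symm
      have hdiv : (m + 2 + 1) / 2 = (m + 1) / 2 + 1 := by omega
      have hmod : (m + 2 + 1) % 2 = (m + 1) % 2 := by omega
      calc (bLoop v (List.replicate (m + 2) v ++ rest)).filter (fun u => u ≠ 0)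
          = 2 * v :: (bLoop v (List.replicate m v ++ rest)).filter (fun u => u ≠ 0) := by
            simp [List.replicate_succ, bLoop, h0v, h2v]
        _ = List.replicate ((m + 2 + 1) / 2) (2 * v)
              ++ List.replicate ((m + 2 + 1) % 2) v ++ pvF rest := by
            rw [hih, hdiv, hmod]; simp [List.replicate_succ]

-- head of dropWhile fails the predicate, stated in the form needed below
theorem dropWhile_shape (v : Int) (t : List Int) :
    t.dropWhile (fun x => x = v) = []
      ∨ ∃ x r, t.dropWhile (fun x => x = v) = x :: r ∧ x ≠ v := by
  cases hd : t.dropWhile (fun x => x = v) with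
  | nil => exact Or.inl rfl
  | cons x r =>
    right
    refine ⟨x, r, rfl, ?_⟩
    have := List.head?_dropWhile_not (fun x => decide (x = v)) t
    rw [hd] at this
    simpa using this

-- B's run-length output equals the nonzeros of the sequential merge scan
theorem bRuns_eq_pvF_aux : ∀ (n : Nat) (l : List Int), l.length ≤ n → bRuns l = pvF l := by
  intro n
  induction n with
  | zero =>
    intro l hl
    have : l = [] := List.eq_nil_of_length_eq_zero (by omega)
    subst this; simp [bRuns, pvF]
  | succ n ih =>
    intro l hl
    match l with
    | [] => simp [bRuns, pvF]
    | v :: t =>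
      have hsplit : t.takeWhile (fun x => x = v) ++ t.dropWhile (fun x => x = v) = t :=
        List.takeWhile_append_dropWhile
      have hrepl : t.takeWhile (fun x => x = v)
          = List.replicate (t.takeWhile (fun x => x = v)).length v := by
        apply List.eq_replicate_iff.mpr
        refine ⟨rfl, fun b hb => ?_⟩
        have := List.mem_takeWhile_imp hb
        simpa using this
      have hsub : (t.dropWhile (fun x => x = v)).length < (v :: t).length := by
        have := List.length_dropWhile_le (fun x => decide (x = v)) t
        simp; omega
      have hrec : bRuns (t.dropWhile (fun x => x = v)) = pvF (t.dropWhile (fun x => x = v)) := by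
        apply ih
        have := List.length_dropWhile_le (fun x => decide (x = v)) t
        simp at hl; omega
      set m := (t.takeWhile (fun x => x = v)).length with hm
      have hshape := dropWhile_shape v t
      rw [bRuns]
      show (if v ≠ 0 then List.replicate ((m + 1) / 2) (2 * v) ++ List.replicate ((m + 1) % 2) v
              else []) ++ bRuns (t.dropWhile (fun x => x = v)) = pvF (v :: t)
      have hF : pvF (v :: t) = (bLoop v (List.replicate m v ++ t.dropWhile (fun x => x = v))).filter
            (fun u => u ≠ 0) := by
        conv_lhs => rw [pvF, ← hsplit, hrepl]
      by_cases hv : v = 0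
      · subst hv
        rw [hF, filter_bLoop_zero_run, hrec]
        simp
      · rw [hF, filter_bLoop_run v hv m _ hshape, hrec]
        simp [hv, List.append_assoc]

theorem bRuns_eq_pvF (l : List Int) : bRuns l = pvF l :=
  bRuns_eq_pvF_aux l.length l le_rfl

-- ===== A-side loop invariant (unchanged from the merge-scan characterisation of A) =====
theorem loop_eq (rest : List Int) : ∀ (done ans : List Int) (cur : Int) (c : Int),
    (PySem.List.pyRange (done.length : Int) ((done.length : Int) + rest.length) 1).foldl aStep
        (done ++ cur :: rest, ans, c)
      = (done ++ bLoop cur rest,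
         ans ++ ((bLoop cur rest).dropLast.filter (fun v => v ≠ 0)),
         c + ((bLoop cur rest).dropLast.count 0)) := by
  induction rest with
  | nil =>
    intro done ans cur c
    simp [PySem.List.pyRange_one_eq_nil, bLoop]
  | cons x r ih =>
    intro done ans cur c
    have hlt : (done.length : Int) < (done.length : Int) + ((x :: r).length : Int) := by
      simp
    rw [PySem.List.pyRange_one_cons hlt, List.foldl_cons]
    have hget0 : PySem.List.pyGetD (done ++ cur :: x :: r) (done.length : Int) 0 = cur := by
      rw [PySem.List.pyGetD_natCast]
      simp [List.getD]
    have hget1 : PySem.List.pyGetD (done ++ cur :: x :: r) ((done.length : Int) + 1) 0 = x := by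
      have h1 : ((done.length : Int) + 1) = ((done.length + 1 : Nat) : Int) := by push_cast; ring
      rw [h1, PySem.List.pyGetD_natCast]
      simp [List.getD]
    by_cases hcx : cur = x
    · -- doubled branch
      subst hcx
      have hset : PySem.List.pySetD
            (PySem.List.pySetD (done ++ cur :: cur :: r) (done.length : Int) (2 * cur))
            ((done.length : Int) + 1) 0
          = done ++ 2 * cur :: 0 :: r := by
        have h1 : ((done.length : Int) + 1) = ((done.length + 1 : Nat) : Int) := by push_cast; ring
        rw [PySem.List.pySetD_natCast, h1, PySem.List.pySetD_natCast]
        rw [List.set_append_right _ _ (le_refl _), List.set_append_right _ _ (by omega)]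
        simp
      have hg : PySem.List.pyGetD (done ++ 2 * cur :: 0 :: r) (done.length : Int) 0 = 2 * cur := by
        rw [PySem.List.pyGetD_natCast]
        simp [List.getD]
      have hstep : aStep (done ++ cur :: cur :: r, ans, c) (done.length : Int)
          = if 2 * cur = 0 then (done ++ 2 * cur :: 0 :: r, ans, c + 1)
            else (done ++ 2 * cur :: 0 :: r, ans ++ [2 * cur], c) := by
        simp only [aStep, hget0, hget1, if_true, hset, hg]
      have harr : done ++ 2 * cur :: 0 :: r = (done ++ [2 * cur]) ++ 0 :: r := by simp
      have hrange : (PySem.List.pyRange ((done.length : Int) + 1)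
            ((done.length : Int) + (((cur :: r).length : Nat) : Int)) 1)
          = PySem.List.pyRange (((done ++ [2 * cur]).length : Nat) : Int)
              ((((done ++ [2 * cur]).length : Nat) : Int) + (r.length : Int)) 1 := by
        congr 1 <;> (simp; try ring)
      have hd0 : (0 :: bLoop 0 r).dropLast = 0 :: (bLoop 0 r).dropLast := by
        rw [List.dropLast_cons_of_ne_nil (bLoop_ne_nil 0 r)]
      have hd : (2 * cur :: bLoop 0 r).dropLast = 2 * cur :: (bLoop 0 r).dropLast := by
        rw [List.dropLast_cons_of_ne_nil (bLoop_ne_nil 0 r)]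
      rw [hstep]
      split_ifs with hz
      · rw [harr, hrange, ih (done ++ [2 * cur]) ans 0 (c + 1)]
        simp only [bLoop, if_true]
        simp [hd0, hz]
        omega
      · rw [harr, hrange, ih (done ++ [2 * cur]) (ans ++ [2 * cur]) 0 c]
        simp only [bLoop, if_true]
        simp [hd, hz]
    · -- unchanged branch
      have hstep : aStep (done ++ cur :: x :: r, ans, c) (done.length : Int)
          = if cur = 0 then (done ++ cur :: x :: r, ans, c + 1)
            else (done ++ cur :: x :: r, ans ++ [cur], c) := by
        simp only [aStep, hget0, hget1, if_neg hcx]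
      have harr : done ++ cur :: x :: r = (done ++ [cur]) ++ x :: r := by simp
      have hrange : (PySem.List.pyRange ((done.length : Int) + 1)
            ((done.length : Int) + ((x :: r).length : Int)) 1)
          = PySem.List.pyRange (((done ++ [cur]).length : Nat) : Int)
              ((((done ++ [cur]).length : Nat) : Int) + (r.length : Int)) 1 := by
        congr 1 <;> (simp; try ring)
      have hd0x : (0 :: bLoop x r).dropLast = 0 :: (bLoop x r).dropLast := by
        rw [List.dropLast_cons_of_ne_nil (bLoop_ne_nil x r)]
      have hd : (cur :: bLoop x r).dropLast = cur :: (bLoop x r).dropLast := by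
        rw [List.dropLast_cons_of_ne_nil (bLoop_ne_nil x r)]
      rw [hstep]
      split_ifs with hz
      · rw [harr, hrange, ih (done ++ [cur]) ans x (c + 1)]
        simp only [bLoop, if_neg hcx]
        simp [hd0x, hz]
        omega
      · rw [harr, hrange, ih (done ++ [cur]) (ans ++ [cur]) x c]
        simp only [bLoop, if_neg hcx]
        simp [hd, hz]

-- the number of padding zeros equals the zero count of the operated list
theorem filter_add_count (l : List Int) :
    (l.filter (fun v => v ≠ 0)).length + l.count 0 = l.length := by
  induction l with
  | nil => simp
  | cons x r ih =>
    simp only [ne_eq] at ih ⊢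
    by_cases hx : x = 0 <;> simp [hx] at ih ⊢ <;> omega

theorem applyOperations1_eq_alt (nums : List Int) (h : nums ≠ []) :
    applyOperations1 nums = applyOperations1_alt nums := by
  obtain ⟨hd, tl, rfl⟩ := List.exists_cons_of_ne_nil h
  simp only [applyOperations1, applyOperations1_alt]
  rw [bRuns_eq_pvF]
  show _ = pvF (hd :: tl) ++ _
  rw [pvF]
  have hlen : (((hd :: tl).length : Int) - 1) = (0 : Int) + (tl.length : Int) := by
    simp
  rw [hlen]
  have hloop := loop_eq tl [] [] hd 0
  simp only [List.nil_append, List.length_nil, Nat.cast_zero] at hloop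
  rw [hloop]
  have hne := bLoop_ne_nil hd tl
  have hsplit : bLoop hd tl = (bLoop hd tl).dropLast ++ [(bLoop hd tl).getLast hne] :=
    (List.dropLast_concat_getLast hne).symm
  have hlast : PySem.List.pyGetD (bLoop hd tl) (-1) 0 = (bLoop hd tl).getLast hne :=
    PySem.List.pyGetD_neg_one (bLoop hd tl) 0 hne
  set d := (bLoop hd tl).dropLast with hd_def
  set L := (bLoop hd tl).getLast hne with hL_def
  have hflen : (bLoop hd tl).length = tl.length + 1 := bLoop_length hd tl
  have hfc := filter_add_count (bLoop hd tl)
  simp only [hlast]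
  by_cases hz : L = 0
  · rw [if_pos hz, if_pos hz]
    have hfilter : (bLoop hd tl).filter (fun v => v ≠ 0) = d.filter (fun v => v ≠ 0) := by
      conv_lhs => rw [hsplit]
      simp [hz]
    have hcnt : (bLoop hd tl).count 0 = d.count 0 + 1 := by
      conv_lhs => rw [hsplit]
      simp [hz]
    rw [hfilter] at hfc ⊢
    congr 1
    have hsz : (hd :: tl).length = tl.length + 1 := by simp
    have harg : ((0 : Int) + (d.count 0 : Int) + 1).toNat
        = (hd :: tl).length - (d.filter (fun v => v ≠ 0)).length := by omega
    rw [harg]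
  · rw [if_neg hz, if_neg hz]
    have hfilter : (bLoop hd tl).filter (fun v => v ≠ 0) = d.filter (fun v => v ≠ 0) ++ [L] := by
      conv_lhs => rw [hsplit]
      simp [hz]
    have hcnt : (bLoop hd tl).count 0 = d.count 0 := by
      conv_lhs => rw [hsplit]
      simp [hz]
    rw [hfilter] at hfc ⊢
    simp only [List.length_append, List.length_singleton] at hfc
    simp only [List.append_assoc]
    congr 2
    have hsz : (hd :: tl).length = tl.length + 1 := by simp
    have harg : ((0 : Int) + (d.count 0 : Int)).toNat
        = (hd :: tl).length - ((d.filter (fun v => v ≠ 0)).length + 1) := by omega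
    rw [harg]
    simp

-- ===== VERDICT (by name: the statement is the Claim_ definition above) =====
theorem applyOperations1_spec : Claim_equal_applyOperations1 := by
  intro nums _ hpre
  exact applyOperations1_eq_alt nums hpre
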